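-- pv_equiv track=rewrite | github.com/kppro1211/New | 3var.py | convertbinary
-- ===== SOURCE A (Python) =====
-- def convertbinary(term):
--     binary = []
--     term = term.strip()
--     count = 0
--     for literal in term:
--         if literal == "'":
--             count = count +1
--             continue
--         if count < len(term)-1 and term [count + 1] == "'":
--             binary.append('0')
--             count=count+1
--         else:
--             binary.append('1')
--             count = count +1
--     count1=0
--     for digit in binary:
--         digit = int(digit)
--         binary[count1]=digit
--         count1+=1
--     return binary
-- ===== SOURCE B (Python) =====
-- def convertbinary(term):
--     binary = []
--     for ch in term.strip():
--         if ch == "'":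
--             if binary:
--                 binary[-1] = 0
--         else:
--             binary.append(1)
--     return binary
-- ===== Notes on version B (the rewrite author's own statement) =====
-- stated objective: simpler
-- what changed: A's look-ahead test on the next character (via an index into the string) followed by a second pass converting digit strings to ints is replaced by a single look-behind pass that appends the int one per literal and zeroes the last appended element on an apostrophe (skipping stray leading apostrophes).
import Mathlib
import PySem

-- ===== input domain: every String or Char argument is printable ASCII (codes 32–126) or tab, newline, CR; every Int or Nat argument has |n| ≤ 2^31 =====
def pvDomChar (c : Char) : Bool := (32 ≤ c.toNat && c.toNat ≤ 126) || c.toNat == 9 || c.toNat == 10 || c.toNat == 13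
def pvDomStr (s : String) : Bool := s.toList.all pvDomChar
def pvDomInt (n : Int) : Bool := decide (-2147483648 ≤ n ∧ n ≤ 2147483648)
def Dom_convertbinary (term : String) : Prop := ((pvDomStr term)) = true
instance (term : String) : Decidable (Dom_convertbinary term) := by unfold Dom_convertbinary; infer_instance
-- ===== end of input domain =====

-- B replaces A's look-ahead test and second int-conversion pass by one look-behind pass
-- appending ints directly (simpler; return value only, A mutates no argument).

-- ===== PORT A =====
-- state: (binary, count); A looks ahead at term[count+1]
def convA_step (cs : List Char) (st : List String × Int) (literal : Char) : List String × Int :=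
  if literal = '\'' then (st.1, st.2 + 1)
  else if st.2 < PySem.List.len cs - 1 ∧ PySem.List.pyGet? cs (st.2 + 1) = some '\'' then
    (st.1 ++ ["0"], st.2 + 1)
  else (st.1 ++ ["1"], st.2 + 1)

def convertbinary (term : String) : List Int :=
  let cs := (PySem.Str.strip term).toList
  let binary := (cs.foldl (convA_step cs) ([], 0)).1
  -- second loop rewrites each element in place with int(digit); int() cannot fail here
  -- (every element is "0" or "1"), so the getD default is never used
  binary.map (fun d => (PySem.Int.ofStr? d).getD 0)

-- ===== PORT B =====
-- one pass, look-behind: apostrophe zeroes the last emitted literal (binary[-1] = 0)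
def convB_step (binary : List Int) (ch : Char) : List Int :=
  if ch = '\'' then
    if binary ≠ [] then PySem.List.pySetD binary (-1) 0 else binary
  else binary ++ [1]

def convertbinary_alt (term : String) : List Int :=
  ((PySem.Str.strip term).toList).foldl convB_step []

-- ===== PRECONDITION & SPEC =====
def Spec_convertbinary (term : String) (out : List Int) : Prop := out = convertbinary_alt term
instance (term : String) (out : List Int) : Decidable (Spec_convertbinary term out) := by unfold Spec_convertbinary; infer_instance

-- ===== CLAIM (what is proved, stated in full; the proofs are below) =====
def Claim_equal_convertbinary : Prop := ∀ (term : String), Dom_convertbinary term → Spec_convertbinary term (convertbinary term)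

-- ===== LEMMAS AND PROOFS =====

-- the common specification: for each non-apostrophe char, 0 if the next char is an
-- apostrophe, else 1; apostrophes emit nothing
def binOf : List Char → List Int
  | [] => []
  | c :: rest =>
    if c = '\'' then binOf rest
    else (if rest.head? = some '\'' then 0 else 1) :: binOf rest

def zeroLast (b : List Int) : List Int := if b = [] then b else b.dropLast ++ [0]

theorem set_last (v : Int) : ∀ (b : List Int), b ≠ [] → b.set (b.length - 1) v = b.dropLast ++ [v]
  | [_], _ => rfl
  | _ :: y :: t, _ => by
    simp only [List.length_cons, Nat.add_sub_cancel, List.set_cons_succ, List.dropLast_cons₂,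
      List.cons_append]
    simpa using set_last v (y :: t) (by simp)

theorem pySetD_last (b : List Int) (h : b ≠ []) (v : Int) :
    PySem.List.pySetD b (-1) v = b.dropLast ++ [v] := by
  simp only [PySem.List.pySetD, PySem.List.pySet?, Int.reduceNeg, PySem.List.pyIdx?]
  have hl : 0 < b.length := List.length_pos_iff.mpr h
  split_ifs with h1 h2 <;> try omega
  simp only [Option.map_some, Option.getD_some]
  simpa using set_last v b h

theorem zeroLast_concat (b : List Int) (x : Int) : zeroLast (b ++ [x]) = b ++ [0] := by
  simp [zeroLast]

theorem zeroLast_idem (b : List Int) : zeroLast (zeroLast b) = zeroLast b := by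
  rcases eq_or_ne b [] with h | h
  · simp [h, zeroLast]
  · simp only [zeroLast, if_neg h]
    exact zeroLast_concat _ _

theorem foldB_eq (l : List Char) : ∀ (b : List Int),
    l.foldl convB_step b = (if l.head? = some '\'' then zeroLast b else b) ++ binOf l := by
  induction l with
  | nil => intro b; simp [binOf]
  | cons c rest ih =>
    intro b
    by_cases hc : c = '\''
    · have hstep : convB_step b c = zeroLast b := by
        rcases eq_or_ne b [] with hb | hb
        · simp [convB_step, hc, hb, zeroLast]
        · simp [convB_step, hc, hb, zeroLast, pySetD_last b hb]
      subst hc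
      rw [List.foldl_cons, hstep, ih]
      simp [binOf, zeroLast_idem]
    · have hstep : convB_step b c = b ++ [1] := by simp [convB_step, hc]
      rw [List.foldl_cons, hstep, ih]
      by_cases hr : rest.head? = some '\''
      · simp [binOf, hc, hr, zeroLast_concat]
      · simp [binOf, hc, hr]

def toS (z : Int) : String := if z = 0 then "0" else "1"

theorem foldA_eq (cs : List Char) : ∀ (l : List Char) (i : Nat) (b : List String),
    l = cs.drop i →
    l.foldl (convA_step cs) (b, (i : Int)) = (b ++ (binOf l).map toS, (i : Int) + l.length) := by
  intro l
  induction l with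
  | nil => intro i b _; simp [binOf]
  | cons c rest ih =>
    intro i b hdrop
    have hi : i < cs.length := by
      by_contra h
      rw [List.drop_eq_nil_of_le (by omega)] at hdrop
      simp at hdrop
    have hrest : rest = cs.drop (i + 1) := by
      have := congrArg List.tail hdrop
      simpa [List.tail_drop] using this
    have hcast : (i : Int) + 1 = ((i + 1 : Nat) : Int) := by push_cast; ring
    have hget : PySem.List.pyGet? cs ((i : Int) + 1) = rest.head? := by
      rw [hcast, PySem.List.pyGet?_natCast, hrest, List.head?_eq_getElem?]
      simp [List.getElem?_drop]
    by_cases hc : c = '\''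
    · have hstep : convA_step cs (b, (i : Int)) c = (b, (i : Int) + 1) := by
        simp [convA_step, hc]
      rw [List.foldl_cons, hstep, hcast, ih (i + 1) b hrest]
      simp only [binOf, hc, if_pos, List.length_cons, Prod.mk.injEq]
      refine ⟨by simp, by push_cast; ring⟩
    · by_cases hr : rest.head? = some '\''
      · have hne : rest ≠ [] := by intro h; rw [h] at hr; simp at hr
        have hlen : (i : Int) < (cs.length : Int) - 1 := by
          have : rest.length = cs.length - (i + 1) := by rw [hrest, List.length_drop]
          have := List.length_pos_iff.mpr hne
          omega
        have hstep : convA_step cs (b, (i : Int)) c = (b ++ ["0"], (i : Int) + 1) := by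
          simp only [convA_step, if_neg hc, PySem.List.len_eq, hget]
          rw [if_pos ⟨hlen, hr⟩]
        rw [List.foldl_cons, hstep, hcast, ih (i + 1) (b ++ ["0"]) hrest]
        simp only [binOf, if_neg hc, if_pos hr, List.map_cons, List.length_cons, Prod.mk.injEq]
        refine ⟨by simp [toS], by push_cast; ring⟩
      · have hstep : convA_step cs (b, (i : Int)) c = (b ++ ["1"], (i : Int) + 1) := by
        -- the look-ahead test fails: either at the last index or the next char is not '
          simp only [convA_step, if_neg hc, PySem.List.len_eq, hget]
          rw [if_neg (by tauto)]
        rw [List.foldl_cons, hstep, hcast, ih (i + 1) (b ++ ["1"]) hrest]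
        simp only [binOf, if_neg hc, if_neg hr, List.map_cons, List.length_cons, Prod.mk.injEq]
        refine ⟨by simp [toS], by push_cast; ring⟩

theorem map_conv_binOf (l : List Char) :
    ((binOf l).map toS).map (fun d => (PySem.Int.ofStr? d).getD 0) = binOf l := by
  induction l with
  | nil => simp [binOf]
  | cons c rest ih =>
    have h0 : (PySem.Int.ofStr? "0").getD 0 = (0 : Int) := by decide
    have h1 : (PySem.Int.ofStr? "1").getD 0 = (1 : Int) := by decide
    simp only [binOf]
    split_ifs with hA hB
    · exact ih
    · simpa [toS, h0] using ih
    · simpa [toS, h1] using ih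

-- ===== VERDICT (by name: the statement is the Claim_ definition above) =====
theorem convertbinary_spec : Claim_equal_convertbinary := by
  intro term _
  unfold Spec_convertbinary
  set cs := (PySem.Str.strip term).toList with hcs
  have hA := foldA_eq cs cs 0 [] (by simp)
  have hB := foldB_eq cs []
  simp only [Nat.cast_zero] at hA
  show ((cs.foldl (convA_step cs) ([], 0)).1).map (fun d => (PySem.Int.ofStr? d).getD 0)
      = cs.foldl convB_step []
  rw [hA]
  simp only [List.nil_append]
  rw [map_conv_binOf, hB]
  have hz : zeroLast [] = [] := rfl
  split_ifs <;> simp [hz]
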